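-- pv_equiv track=rewrite | github.com/Bryan-Brenes/PracticaExamen3 | Ejercicios.py | triangulo_de_pascal_aux_p
-- ===== SOURCE A (Python) =====
-- def triangulo_de_pascal_aux_p(n, nivel, inicio):
--     if nivel == n:
--         if n == 0:
--             return inicio
--         else:
--             return []
--     else:
--         if n == 1:
--             return inicio + [[1, 1]] + triangulo_de_pascal_aux_p(n, nivel + 1, inicio)
--         else:
--             return inicio + [[1] + [2] + [1]] + triangulo_de_pascal_aux_p(n, nivel + 1, inicio)
-- ===== SOURCE B (Python) =====
-- def triangulo_de_pascal_aux_p(n, nivel, inicio):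
--     # Closed form: the recursion emits (inicio + [row]) once per level below n,
--     # then the base case appends inicio when n == 0 (else nothing).
--     row = [1, 1] if n == 1 else [1, 2, 1]
--     body = (inicio + [row]) * (n - nivel)
--     return body + (inicio if n == 0 else [])
-- ===== Notes on version B (the rewrite author's own statement) =====
-- stated objective: simpler
-- what changed: Replaces the recursion with a closed form: the answer is (inicio + [row]) repeated (n - nivel) times followed by the base-case tail (inicio when n == 0, else []).
import Mathlib
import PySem

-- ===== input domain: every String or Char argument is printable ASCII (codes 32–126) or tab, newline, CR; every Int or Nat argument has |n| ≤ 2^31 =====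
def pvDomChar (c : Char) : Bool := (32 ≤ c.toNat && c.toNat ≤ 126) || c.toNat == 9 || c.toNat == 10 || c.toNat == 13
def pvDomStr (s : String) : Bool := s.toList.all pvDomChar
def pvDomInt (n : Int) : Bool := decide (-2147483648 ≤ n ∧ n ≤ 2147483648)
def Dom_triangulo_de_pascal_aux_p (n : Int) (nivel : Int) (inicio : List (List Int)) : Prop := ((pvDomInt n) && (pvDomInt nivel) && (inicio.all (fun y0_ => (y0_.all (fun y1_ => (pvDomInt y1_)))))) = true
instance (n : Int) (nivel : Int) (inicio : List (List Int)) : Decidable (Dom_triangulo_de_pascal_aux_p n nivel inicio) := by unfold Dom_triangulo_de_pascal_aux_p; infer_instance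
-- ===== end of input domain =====

-- B replaces A's recursion with a closed form (repeat count n - nivel); return-value
-- equivalence is proved on nivel ≤ n, where A terminates.

-- ===== PORT A =====
-- Fuel-indexed transliteration of A's recursion; the fuel n - nivel is exactly the
-- recursion depth on Pre_ (nivel ≤ n); outside Pre_ the Python recursion never returns.
def pvAgo (fuel : Nat) (n : Int) (nivel : Int) (inicio : List (List Int)) : List (List Int) :=
  if nivel == n then
    (if n == 0 then inicio else [])
  else
    match fuel with
    | 0 => []  -- unreachable on Pre_ (Python diverges here)
    | fuel' + 1 =>
      if n == 1 then inicio ++ [[1, 1]] ++ pvAgo fuel' n (nivel + 1) inicio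
      else inicio ++ [[1] ++ [2] ++ [1]] ++ pvAgo fuel' n (nivel + 1) inicio

def triangulo_de_pascal_aux_p (n : Int) (nivel : Int) (inicio : List (List Int)) : List (List Int) :=
  pvAgo (n - nivel).toNat n nivel inicio

-- ===== PORT B =====
-- (xs * k) for Python list repetition: k ≤ 0 gives [] — (n - nivel).toNat is exact here.
def triangulo_de_pascal_aux_p_alt (n : Int) (nivel : Int) (inicio : List (List Int)) : List (List Int) :=
  let row := if n == 1 then [1, 1] else [1, 2, 1]
  let body := (List.replicate (n - nivel).toNat (inicio ++ [row])).flatten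
  body ++ (if n == 0 then inicio else [])

-- ===== PRECONDITION & SPEC =====
-- Pre_ excludes nivel > n, on which the Python A recurses forever (RecursionError).
def Pre_triangulo_de_pascal_aux_p (n : Int) (nivel : Int) (inicio : List (List Int)) : Prop := nivel ≤ n
instance (n : Int) (nivel : Int) (inicio : List (List Int)) : Decidable (Pre_triangulo_de_pascal_aux_p n nivel inicio) := by unfold Pre_triangulo_de_pascal_aux_p; infer_instance
def pvWitness_triangulo_de_pascal_aux_p : Int × Int × List (List Int) := (3, 0, [[7]])

def Spec_triangulo_de_pascal_aux_p (n : Int) (nivel : Int) (inicio : List (List Int)) (out : List (List Int)) : Prop := out = triangulo_de_pascal_aux_p_alt n nivel inicio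
instance (n : Int) (nivel : Int) (inicio : List (List Int)) (out : List (List Int)) : Decidable (Spec_triangulo_de_pascal_aux_p n nivel inicio out) := by unfold Spec_triangulo_de_pascal_aux_p; infer_instance

-- ===== CLAIM =====
def Claim_equal_triangulo_de_pascal_aux_p : Prop := ∀ (n : Int) (nivel : Int) (inicio : List (List Int)), Dom_triangulo_de_pascal_aux_p n nivel inicio → Pre_triangulo_de_pascal_aux_p n nivel inicio → Spec_triangulo_de_pascal_aux_p n nivel inicio (triangulo_de_pascal_aux_p n nivel inicio)

-- ===== LEMMAS AND PROOFS =====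
lemma pvAgo_closed (k : Nat) : ∀ (n nivel : Int) (inicio : List (List Int)),
    nivel ≤ n → (n - nivel).toNat = k →
    pvAgo k n nivel inicio = triangulo_de_pascal_aux_p_alt n nivel inicio := by
  induction k with
  | zero =>
    intro n nivel inicio hle hk
    have hn : nivel = n := by omega
    subst hn
    simp [pvAgo, triangulo_de_pascal_aux_p_alt]
  | succ k ih =>
    intro n nivel inicio hle hk
    have hne : nivel ≠ n := by omega
    have hk' : (n - (nivel + 1)).toNat = k := by omega
    have ih' := ih n (nivel + 1) inicio (by omega) hk'
    unfold pvAgo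
    rw [if_neg (by simpa using hne)]
    simp only [ih']
    unfold triangulo_de_pascal_aux_p_alt
    simp only [hk, hk', List.replicate_succ, List.flatten_cons]
    by_cases h1 : n = 1 <;> simp [h1, List.append_assoc]

-- ===== VERDICT =====
theorem triangulo_de_pascal_aux_p_spec : Claim_equal_triangulo_de_pascal_aux_p := by
  intro n nivel inicio _ hpre
  unfold Spec_triangulo_de_pascal_aux_p triangulo_de_pascal_aux_p
  exact pvAgo_closed _ n nivel inicio hpre rfl
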